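-- pv_equiv track=rewrite | github.com/TanFangZhou/CRC_Phython | crc/crc.py | str2lst
-- ===== SOURCE A (Python) =====
-- def str2lst(list0):
--     len0 = len(list0)
--     list1 = [[] for i in range(len0)]
--     for i in range(len0):
--         string = list0[i]
--         len1 = len(string)
--         j = 0
--         while j < len1:
--             k = j+1
--             while k < len1:
--                 if string[k].isdecimal():
--                     k += 1
--                 else:
--                     break
--             list1[i].append(string[j:k])
--             j = k
--         list1[i].sort()
--     return list1
-- ===== SOURCE B (Python) =====
-- def str2lst(list0):
--     # Single linear scan per string with a running token accumulator,
--     # instead of nested index-based while loops with slicing.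
--     result = []
--     for s in list0:
--         toks = []
--         cur = None
--         for ch in s:
--             if cur is not None and ch.isdecimal():
--                 cur += ch
--             else:
--                 if cur is not None:
--                     toks.append(cur)
--                 cur = ch
--         if cur is not None:
--             toks.append(cur)
--         toks.sort()
--         result.append(toks)
--     return result
-- ===== Notes on version B (the rewrite author's own statement) =====
-- stated objective: alternative
-- what changed: Replaced the nested index-advancing while loops with slicing by a single left-to-right fold per string that grows the current token in an accumulator and flushes it when a non-digit starts a new token.
import Mathlib
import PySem

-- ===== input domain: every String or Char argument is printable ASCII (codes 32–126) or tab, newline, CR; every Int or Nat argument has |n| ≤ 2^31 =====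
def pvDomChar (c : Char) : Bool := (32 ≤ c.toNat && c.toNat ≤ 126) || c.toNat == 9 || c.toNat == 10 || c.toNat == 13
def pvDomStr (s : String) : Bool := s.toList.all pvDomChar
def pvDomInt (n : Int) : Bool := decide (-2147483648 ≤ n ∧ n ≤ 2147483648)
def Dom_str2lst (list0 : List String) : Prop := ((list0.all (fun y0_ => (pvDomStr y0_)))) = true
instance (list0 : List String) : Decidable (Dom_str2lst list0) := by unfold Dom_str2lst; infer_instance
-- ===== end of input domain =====

-- B replaces A's nested index-advancing while loops (with slicing) by a single
-- left-to-right fold per string carrying the current token; same output, same cost.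

-- ===== PORT A =====
-- inner 'while k < len1: if string[k].isdecimal(): k += 1 else: break'
def innerA (cs : List Char) (len1 k : Nat) : Nat :=
  if _h : k < len1 then
    if PySem.Chars.isdigit (cs.getD k ' ') then innerA cs len1 (k + 1) else k
  else k
termination_by len1 - k

theorem le_innerA (cs : List Char) (len1 k : Nat) : k ≤ innerA cs len1 k := by
  unfold innerA
  split
  · split
    · have := le_innerA cs len1 (k + 1); omega
    · exact le_refl k
  · exact le_refl k
termination_by len1 - k

-- outer 'while j < len1: …; list1[i].append(string[j:k]); j = k'
def outerA (cs : List Char) (len1 j : Nat) : List String :=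
  if _h : j < len1 then
    let k := innerA cs len1 (j + 1)
    String.ofList (PySem.List.slice cs (some (j : Int)) (some (k : Int))) :: outerA cs len1 k
  else []
termination_by len1 - j
decreasing_by
  have := le_innerA cs len1 (j + 1); omega

def str2lst (list0 : List String) : List (List String) :=
  list0.map (fun s =>
    PySem.List.sorted (outerA s.toList s.toList.length 0) (fun x => x) false)

-- ===== PORT B =====
-- one fold step: extend the current token with a digit, or flush it and start a new one
def tokStep (st : List (List Char) × Option (List Char)) (ch : Char) :
    List (List Char) × Option (List Char) :=
  match st with
  | (acc, some cur) =>
      if PySem.Chars.isdigit ch then (acc, some (cur ++ [ch]))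
      else (acc ++ [cur], some [ch])
  | (acc, none) => (acc, some [ch])

def tokB (cs : List Char) : List (List Char) :=
  match cs.foldl tokStep ([], none) with
  | (acc, some cur) => acc ++ [cur]
  | (acc, none) => acc

def str2lst_alt (list0 : List String) : List (List String) :=
  list0.map (fun s =>
    PySem.List.sorted ((tokB s.toList).map (fun t => String.ofList t)) (fun x => x) false)

-- ===== PRECONDITION & SPEC =====
def Spec_str2lst (list0 : List String) (out : List (List String)) : Prop := out = str2lst_alt list0
instance (list0 : List String) (out : List (List String)) : Decidable (Spec_str2lst list0 out) := by unfold Spec_str2lst; infer_instance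

-- ===== CLAIM (what is proved, stated in full; the proofs are below) =====
def Claim_equal_str2lst : Prop := ∀ (list0 : List String), Dom_str2lst list0 → Spec_str2lst list0 (str2lst list0)

-- ===== LEMMAS AND PROOFS =====

-- common specification of the tokenisation: head char plus its run of digits
def tokSpec (cs : List Char) : List (List Char) :=
  match cs with
  | [] => []
  | c :: rest =>
      (c :: rest.takeWhile PySem.Chars.isdigit) :: tokSpec (rest.dropWhile PySem.Chars.isdigit)
termination_by cs.length
decreasing_by
  simp only [List.length_cons]
  have := (List.dropWhile_sublist (l := rest) PySem.Chars.isdigit).length_le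
  omega

theorem dropWhile_eq_drop (p : Char → Bool) (l : List Char) :
    l.dropWhile p = l.drop (l.takeWhile p).length := by
  induction l with
  | nil => rfl
  | cons c rest ih =>
    by_cases h : p c = true
    · simp [List.dropWhile, List.takeWhile, h, ih]
    · simp [List.dropWhile, List.takeWhile, h]

theorem take_takeWhile_length (p : Char → Bool) (l : List Char) :
    l.take (l.takeWhile p).length = l.takeWhile p := by
  induction l with
  | nil => rfl
  | cons c rest ih =>
    by_cases h : p c = true
    · simp [List.takeWhile, h, ih]
    · simp [List.takeWhile, h]

theorem innerA_spec (cs : List Char) (k : Nat) :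
    innerA cs cs.length k = k + ((cs.drop k).takeWhile PySem.Chars.isdigit).length := by
  unfold innerA
  split
  · rename_i h
    have hd : cs.drop k = cs[k] :: cs.drop (k + 1) := List.drop_eq_getElem_cons h
    have hg : cs.getD k ' ' = cs[k] := List.getD_eq_getElem cs ' ' h
    by_cases hdig : PySem.Chars.isdigit cs[k] = true
    · rw [hg, if_pos hdig, innerA_spec cs (k + 1), hd]
      simp [List.takeWhile, hdig]; omega
    · rw [hg, if_neg hdig, hd]
      simp [List.takeWhile, hdig]
  · rename_i h
    have : cs.drop k = [] := by
      apply List.drop_eq_nil_of_le; omega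
    simp [this]
termination_by cs.length - k

theorem outerA_spec (cs : List Char) (j : Nat) :
    outerA cs cs.length j = (tokSpec (cs.drop j)).map (fun t => String.ofList t) := by
  unfold outerA
  split
  · rename_i h
    have hd : cs.drop j = cs[j] :: cs.drop (j + 1) := List.drop_eq_getElem_cons h
    set rest := cs.drop (j + 1) with hrest
    set t := (rest.takeWhile PySem.Chars.isdigit).length with ht
    have hk : innerA cs cs.length (j + 1) = (j + 1) + t := innerA_spec cs (j + 1)
    have htlen : t ≤ rest.length := by
      rw [ht]; exact (List.takeWhile_sublist (l := rest) _).length_le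
    have hslice : PySem.List.slice cs (some (j : Int)) (some ((innerA cs cs.length (j + 1) : Nat) : Int))
        = cs[j] :: rest.takeWhile PySem.Chars.isdigit := by
      rw [PySem.List.slice_natCast, hd]
      have : innerA cs cs.length (j + 1) - j = t + 1 := by omega
      rw [this]
      simp [List.take_succ_cons, ht, take_takeWhile_length]
    have hrec : outerA cs cs.length (innerA cs cs.length (j + 1))
        = (tokSpec (cs.drop (innerA cs cs.length (j + 1)))).map (fun t => String.ofList t) :=
      outerA_spec cs (innerA cs cs.length (j + 1))
    show String.ofList (PySem.List.slice cs (some (j : Int))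
        (some ((innerA cs cs.length (j + 1) : Nat) : Int)))
      :: outerA cs cs.length (innerA cs cs.length (j + 1)) = _
    rw [hslice, hrec]
    have hdropk : cs.drop (innerA cs cs.length (j + 1)) = rest.dropWhile PySem.Chars.isdigit := by
      rw [hk, dropWhile_eq_drop, hrest, ← ht, List.drop_drop]
    rw [hdropk, hd, tokSpec, List.map_cons]
  · rename_i h
    have : cs.drop j = [] := by apply List.drop_eq_nil_of_le; omega
    simp [this, tokSpec]
termination_by cs.length - j
decreasing_by
  have := le_innerA cs cs.length (j + 1); omega

theorem tokB_run (cs : List Char) (acc : List (List Char)) (cur : List Char) :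
    (match cs.foldl tokStep (acc, some cur) with
     | (a, some c) => a ++ [c]
     | (a, none) => a)
    = acc ++ (cur ++ cs.takeWhile PySem.Chars.isdigit) :: tokSpec (cs.dropWhile PySem.Chars.isdigit) := by
  induction cs generalizing acc cur with
  | nil => simp [tokSpec]
  | cons ch rest ih =>
    by_cases h : PySem.Chars.isdigit ch = true
    · simp only [List.foldl_cons, tokStep, if_pos h]
      rw [ih]
      simp [List.takeWhile, List.dropWhile, h]
    · simp only [List.foldl_cons, tokStep, if_neg h]
      rw [ih]
      simp [List.takeWhile, List.dropWhile, h, tokSpec]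

theorem tokB_eq_tokSpec (cs : List Char) : tokB cs = tokSpec cs := by
  cases cs with
  | nil => simp [tokB, tokSpec]
  | cons c rest =>
    unfold tokB
    simp only [List.foldl_cons, tokStep]
    rw [tokB_run]
    simp [tokSpec]

-- ===== VERDICT (by name: the statement is the Claim_ definition above) =====
theorem str2lst_spec : Claim_equal_str2lst := by
  intro list0 _
  unfold Spec_str2lst str2lst str2lst_alt
  apply List.map_congr_left
  intro s _
  rw [outerA_spec, List.drop_zero, tokB_eq_tokSpec]
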